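-- pv_equiv track=rewrite | github.com/Arshia-CdG/Python-basic1 | 2-3.py | transform
-- ===== SOURCE A (Python) =====
-- def transform(n, c):
--     a = []
--     d = 0
--     while n:
--         n, r = divmod(n, c)
--         a.append(str(r))
--     for i in range (len(a)):
--         d += int(a[len(a)- i - 1]) * (10 ** (len(a) - i - 1))
--     return d
-- ===== SOURCE B (Python) =====
-- def transform(n, c):
--     # Horner-style: accumulate decimal reconstruction directly, no digit-string list.
--     d = 0
--     p = 1
--     while n:
--         n, r = divmod(n, c)
--         d += r * p
--         p *= 10
--     return d
-- ===== Notes on version B (the rewrite author's own statement) =====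
-- stated objective: simpler
-- what changed: A builds a list of digit strings with divmod and then runs a second indexing loop that re-parses each string with int() and scales it by a computed power of ten; B is a single divmod pass that accumulates the decimal reconstruction directly with a running power-of-ten multiplier (d += r*p; p *= 10), with no list, no strings and no exponentiation.
import Mathlib
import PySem

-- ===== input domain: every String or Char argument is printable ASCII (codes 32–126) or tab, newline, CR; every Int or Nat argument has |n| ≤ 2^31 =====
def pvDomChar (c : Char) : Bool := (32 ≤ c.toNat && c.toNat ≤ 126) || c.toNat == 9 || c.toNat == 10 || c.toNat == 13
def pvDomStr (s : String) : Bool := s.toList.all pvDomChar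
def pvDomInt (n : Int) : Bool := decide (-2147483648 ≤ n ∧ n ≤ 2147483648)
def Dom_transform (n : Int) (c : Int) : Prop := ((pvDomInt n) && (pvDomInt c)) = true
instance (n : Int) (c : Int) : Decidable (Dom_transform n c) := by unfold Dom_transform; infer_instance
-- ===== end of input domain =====

-- B replaces A's two passes (collect digit strings, then re-parse each and scale by a power of ten)
-- with one divmod loop that accumulates the result with a running power-of-ten multiplier (objective: simpler).

-- ===== PORT A =====

-- A's `while n:` loop, building the list `a` of `str(r)`.  Fuel 100 covers every input admitted by
-- Dom_transform ∧ Pre_transform (|n| ≤ 2^31 with c ≥ 2 ∧ n ≥ 0 or c ≤ -2 takes at most 34 iterations);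
-- outside Pre_transform the Python loop raises or never terminates, so nothing is claimed there.
def transformLoop (fuel : Nat) (n : Int) (c : Int) (a : List String) : List String :=
  match fuel with
  | 0 => a
  | fuel + 1 =>
    if n = 0 then a
    else transformLoop fuel (PySem.Int.floordiv n c) c (a ++ [PySem.Int.toStr (PySem.Int.mod n c)])

-- decimal value of a digit list (helper of the hand port of `int` below)
def decVal (ds : List Char) : Nat := ds.foldl (fun a c => a * 10 + (c.toNat - 48)) 0

-- Hand port of `int(s)`, exact on every string produced by `str(r)` for an int r (an optional '-'
-- followed by decimal digits) — the only strings A applies it to.  (PySem.Int.ofStr? is the general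
-- parser, but its digit loop is private to the prelude, so this local exact parser is used instead.)
def pyIntOfDec (s : String) : Int :=
  match s.toList with
  | '-' :: ds => -(decVal ds : Int)
  | ds => (decVal ds : Int)

-- A's second loop: for i in range(len(a)): d += int(a[len(a)-i-1]) * 10**(len(a)-i-1).
-- The index len(a)-i-1 is always in range (so `.getD ""` never supplies its default) and the
-- exponent is always ≥ 0 (so `.toNat` is exact there).
def transform (n : Int) (c : Int) : Int :=
  let a := transformLoop 100 n c []
  (PySem.List.pyRange 0 (a.length : Int) 1).foldl
    (fun d i =>
      d + pyIntOfDec ((PySem.List.pyGet? a ((a.length : Int) - i - 1)).getD "")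
            * (10 : Int) ^ ((a.length : Int) - i - 1).toNat)
    0

-- ===== PORT B =====

-- Source B's single loop: while n: n, r = divmod(n, c); d += r * p; p *= 10   (same fuel remark as above)
def transformAltLoop (fuel : Nat) (n : Int) (c : Int) (d : Int) (p : Int) : Int :=
  match fuel with
  | 0 => d
  | fuel + 1 =>
    if n = 0 then d
    else transformAltLoop fuel (PySem.Int.floordiv n c) c (d + PySem.Int.mod n c * p) (p * 10)

def transform_alt (n : Int) (c : Int) : Int := transformAltLoop 100 n c 0 1

-- ===== PRECONDITION & SPEC =====

-- Exactly the inputs on which the Python A returns: for n = 0 the loop never runs; otherwise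
-- c = 0 raises ZeroDivisionError, c ∈ {1, -1} and c ≥ 2 with n < 0 make the divmod loop diverge.
def Pre_transform (n : Int) (c : Int) : Prop := n = 0 ∨ (0 ≤ n ∧ 2 ≤ c) ∨ c ≤ -2
instance (n : Int) (c : Int) : Decidable (Pre_transform n c) := by unfold Pre_transform; infer_instance

def pvWitness_transform : Int × Int := (42, 2)

def Spec_transform (n : Int) (c : Int) (out : Int) : Prop := out = transform_alt n c
instance (n : Int) (c : Int) (out : Int) : Decidable (Spec_transform n c out) := by unfold Spec_transform; infer_instance

-- ===== CLAIM (what is proved, stated in full; the proofs are below) =====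
def Claim_equal_transform : Prop := ∀ (n : Int) (c : Int), Dom_transform n c → Pre_transform n c → Spec_transform n c (transform n c)

-- ===== LEMMAS AND PROOFS =====

-- digit characters
lemma digitChar_toNat (m : Nat) (h : m < 10) : (Nat.digitChar m).toNat = 48 + m := by
  interval_cases m <;> decide

lemma digitChar_ne_dash (m : Nat) (h : m < 10) : Nat.digitChar m ≠ '-' := by
  interval_cases m <;> decide

-- Nat.toDigitsCore facts
lemma tdc_append (f : Nat) : ∀ (n : Nat) (ds : List Char),
    Nat.toDigitsCore 10 f n ds = Nat.toDigitsCore 10 f n [] ++ ds := by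
  induction f with
  | zero => intro n ds; simp [Nat.toDigitsCore]
  | succ f ih =>
    intro n ds
    simp only [Nat.toDigitsCore]
    by_cases h : n / 10 = 0
    · simp [h]
    · simp only [h, if_false]
      rw [ih (n / 10) ((n % 10).digitChar :: ds), ih (n / 10) [(n % 10).digitChar]]
      simp

lemma tdc_val (f : Nat) : ∀ n : Nat, n < 10 ^ f → decVal (Nat.toDigitsCore 10 f n []) = n := by
  induction f with
  | zero => intro n h; interval_cases n; simp [Nat.toDigitsCore, decVal]
  | succ f ih =>
    intro n h
    simp only [Nat.toDigitsCore]
    by_cases h0 : n / 10 = 0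
    · have hn : n < 10 := by omega
      simp only [h0, if_true, decVal, List.foldl_cons, List.foldl_nil]
      rw [digitChar_toNat (n % 10) (by omega)]
      omega
    · simp only [h0, if_false]
      rw [tdc_append]
      have hdiv : n / 10 < 10 ^ f := by
        rw [pow_succ] at h
        omega
      unfold decVal
      rw [List.foldl_append]
      have := ih (n / 10) hdiv
      unfold decVal at this
      rw [this]
      simp only [List.foldl_cons, List.foldl_nil]
      rw [digitChar_toNat (n % 10) (by omega)]
      omega

lemma tdc_no_dash (f : Nat) : ∀ n : Nat, '-' ∉ Nat.toDigitsCore 10 f n [] := by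
  induction f with
  | zero => intro n; simp [Nat.toDigitsCore]
  | succ f ih =>
    intro n
    simp only [Nat.toDigitsCore]
    by_cases h : n / 10 = 0
    · simp only [h, if_true, List.mem_singleton]
      exact fun hc => digitChar_ne_dash (n % 10) (by omega) hc.symm
    · simp only [h, if_false]
      rw [tdc_append]
      intro hmem
      rcases List.mem_append.mp hmem with hmem | hmem
      · exact ih (n / 10) hmem
      · exact digitChar_ne_dash (n % 10) (by omega) (List.mem_singleton.mp hmem).symm

lemma tdc_ne_nil (f n : Nat) : Nat.toDigitsCore 10 (f + 1) n [] ≠ [] := by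
  simp only [Nat.toDigitsCore]
  by_cases h : n / 10 = 0
  · simp [h]
  · simp only [h, if_false]
    rw [tdc_append]
    simp

lemma decVal_toDigits (m : Nat) : decVal (Nat.toDigits 10 m) = m := by
  have hm : m < 10 ^ (m + 1) := by
    calc m < 10 ^ m := Nat.lt_pow_self (by norm_num)
    _ ≤ 10 ^ (m + 1) := Nat.pow_le_pow_right (by norm_num) (Nat.le_succ m)
  exact tdc_val (m + 1) m hm

-- int(str(r)) = r for the hand-ported parser
lemma pyIntOfDec_toStr (r : Int) : pyIntOfDec (PySem.Int.toStr r) = r := by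
  unfold pyIntOfDec
  rw [PySem.Int.toList_toStr]
  unfold PySem.Int.toChars
  by_cases hr : r < 0
  · simp only [hr, if_true]
    rw [decVal_toDigits]
    omega
  · simp only [hr, if_false]
    unfold Nat.toDigits
    cases hL : Nat.toDigitsCore 10 (r.toNat + 1) r.toNat [] with
    | nil => exact absurd hL (tdc_ne_nil r.toNat r.toNat)
    | cons x t =>
      have hx : x ≠ '-' := by
        intro hx
        exact tdc_no_dash (r.toNat + 1) r.toNat (hx ▸ (hL ▸ List.mem_cons_self))
      have hdv : decVal (x :: t) = r.toNat := by
        rw [← hL]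
        exact decVal_toDigits r.toNat
      split
      · rename_i ds heq
        injection heq with h1 h2
        exact absurd h1 hx
      · rw [hdv]; omega

-- B's loop: the accumulator pair (d, p) factors out
lemma altLoop_shift (f : Nat) : ∀ (n c d p : Int),
    transformAltLoop f n c d p = d + p * transformAltLoop f n c 0 1 := by
  induction f with
  | zero => intro n c d p; simp [transformAltLoop]
  | succ f ih =>
    intro n c d p
    simp only [transformAltLoop]
    by_cases h : n = 0
    · simp [h]
    · simp only [h, if_false]
      rw [ih (PySem.Int.floordiv n c) c (d + PySem.Int.mod n c * p) (p * 10),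
          ih (PySem.Int.floordiv n c) c (0 + PySem.Int.mod n c * 1) (1 * 10)]
      ring

-- A's loop: the accumulator list factors out
lemma transformLoop_append (f : Nat) : ∀ (n c : Int) (a : List String),
    transformLoop f n c a = a ++ transformLoop f n c [] := by
  induction f with
  | zero => intro n c a; simp [transformLoop]
  | succ f ih =>
    intro n c a
    simp only [transformLoop]
    by_cases h : n = 0
    · simp [h]
    · simp only [h, if_false]
      rw [ih (PySem.Int.floordiv n c) c (a ++ [PySem.Int.toStr (PySem.Int.mod n c)]),
          ih (PySem.Int.floordiv n c) c ([] ++ [PySem.Int.toStr (PySem.Int.mod n c)])]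
      simp

-- Horner value of A's digit-string list
def pvG : List String → Int
  | [] => 0
  | s :: t => pyIntOfDec s + 10 * pvG t

lemma pvG_loop (f : Nat) : ∀ (n c : Int),
    pvG (transformLoop f n c []) = transformAltLoop f n c 0 1 := by
  induction f with
  | zero => intro n c; simp [transformLoop, transformAltLoop, pvG]
  | succ f ih =>
    intro n c
    simp only [transformLoop, transformAltLoop]
    by_cases h : n = 0
    · simp [h, pvG]
    · simp only [h, if_false]
      rw [transformLoop_append f (PySem.Int.floordiv n c) c, List.nil_append]
      rw [altLoop_shift f (PySem.Int.floordiv n c) c (0 + PySem.Int.mod n c * 1) (1 * 10)]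
      simp only [List.singleton_append, pvG, ih, pyIntOfDec_toStr]
      ring

-- list/Finset sum bridge
lemma list_sum_range (h : Nat → Int) (n : Nat) :
    ((List.range n).map h).sum = ∑ j ∈ Finset.range n, h j := by
  induction n with
  | zero => simp
  | succ n ih => rw [List.range_succ, Finset.sum_range_succ]; simp [ih]

-- straight Horner sum of a string list
lemma sum_getD_eq_pvG (a : List String) :
    (∑ k ∈ Finset.range a.length, pyIntOfDec (a.getD k "") * (10 : Int) ^ k) = pvG a := by
  induction a with
  | nil => simp [pvG]
  | cons s t ih =>
    rw [List.length_cons, Finset.sum_range_succ']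
    simp only [List.getD_cons_succ, List.getD_cons_zero, pow_zero, mul_one]
    have h2 : ∑ i ∈ Finset.range t.length, pyIntOfDec (t.getD i "") * (10 : Int) ^ (i + 1)
        = 10 * ∑ i ∈ Finset.range t.length, pyIntOfDec (t.getD i "") * (10 : Int) ^ i := by
      rw [Finset.mul_sum]
      exact Finset.sum_congr rfl (fun k _ => by rw [pow_succ]; ring)
    rw [h2, pvG, ← ih]
    ring

-- A's indexing loop computes the Horner value of the list
lemma fold_eq_pvG (a : List String) :
    (PySem.List.pyRange 0 (a.length : Int) 1).foldl
      (fun d i =>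
        d + pyIntOfDec ((PySem.List.pyGet? a ((a.length : Int) - i - 1)).getD "")
              * (10 : Int) ^ ((a.length : Int) - i - 1).toNat)
      0 = pvG a := by
  rw [PySem.List.foldl_add
        (g := fun i => pyIntOfDec ((PySem.List.pyGet? a ((a.length : Int) - i - 1)).getD "")
              * (10 : Int) ^ ((a.length : Int) - i - 1).toNat)]
  rw [PySem.List.pyRange_one, List.map_map]
  simp only [sub_zero, Int.toNat_natCast]
  rw [list_sum_range, zero_add]
  have hcong : ∑ k ∈ Finset.range a.length,
      ((fun i => pyIntOfDec ((PySem.List.pyGet? a ((a.length : Int) - i - 1)).getD "")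
              * (10 : Int) ^ ((a.length : Int) - i - 1).toNat) ∘ (fun k : Nat => (0 : Int) + k)) k
      = ∑ k ∈ Finset.range a.length,
          pyIntOfDec (a.getD (a.length - 1 - k) "") * (10 : Int) ^ (a.length - 1 - k) := by
    apply Finset.sum_congr rfl
    intro k hk
    have hk' : k < a.length := Finset.mem_range.mp hk
    have hidx : (a.length : Int) - (0 + (k : Int)) - 1 = ((a.length - 1 - k : Nat) : Int) := by omega
    simp only [Function.comp_apply, hidx, PySem.List.pyGet?_natCast, Int.toNat_natCast]
    rw [List.getD_eq_getElem?_getD]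
  rw [hcong,
      Finset.sum_range_reflect (fun k => pyIntOfDec (a.getD k "") * (10 : Int) ^ k) a.length]
  exact sum_getD_eq_pvG a

-- ===== VERDICT (by name: the statement is the Claim_ definition above) =====
theorem transform_spec : Claim_equal_transform := by
  unfold Claim_equal_transform Spec_transform
  intro n c _ _
  unfold transform transform_alt
  rw [fold_eq_pvG]
  exact pvG_loop 100 n c
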